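-- pv_equiv track=rewrite | github.com/rejsafranko/ID3-Decision-Tree | handler.py | value_extractor
-- ===== SOURCE A (Python) =====
-- def value_extractor(feature_index: int, dataset: list) -> dict:
--     values = dict()
--     for entrypoint in dataset:
--         values[entrypoint[feature_index]] = dict()
--     for entrypoint in dataset:
--         if entrypoint[-1] in values.get(entrypoint[feature_index]).keys():
--             labels = values.get(entrypoint[feature_index])
--             labels[entrypoint[-1]] = labels.get(entrypoint[-1]) + 1
--             values[entrypoint[feature_index]] = labels
--         else:
--             labels = values.get(entrypoint[feature_index])
--             labels[entrypoint[-1]] = 1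
--             values[entrypoint[feature_index]] = labels
--     return values
-- ===== SOURCE B (Python) =====
-- def _tally(labels):
--     counts = {}
--     for label in labels:
--         counts[label] = counts.get(label, 0) + 1
--     return counts
--
--
-- def value_extractor(feature_index: int, dataset: list) -> dict:
--     groups = {}
--     for entrypoint in dataset:
--         groups.setdefault(entrypoint[feature_index], []).append(entrypoint[-1])
--     return {value: _tally(labels) for value, labels in groups.items()}
-- ===== Notes on version B (the rewrite author's own statement) =====
-- stated objective: simpler
-- what changed: Replaces A's two passes over the dataset (an init pass creating empty inner dicts, then a counting pass with an if/else on key presence) by a group-then-tally decomposition: one pass groups the labels per feature value, then each label list is tallied separately; first-occurrence key orders are preserved by construction.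
import Mathlib
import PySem

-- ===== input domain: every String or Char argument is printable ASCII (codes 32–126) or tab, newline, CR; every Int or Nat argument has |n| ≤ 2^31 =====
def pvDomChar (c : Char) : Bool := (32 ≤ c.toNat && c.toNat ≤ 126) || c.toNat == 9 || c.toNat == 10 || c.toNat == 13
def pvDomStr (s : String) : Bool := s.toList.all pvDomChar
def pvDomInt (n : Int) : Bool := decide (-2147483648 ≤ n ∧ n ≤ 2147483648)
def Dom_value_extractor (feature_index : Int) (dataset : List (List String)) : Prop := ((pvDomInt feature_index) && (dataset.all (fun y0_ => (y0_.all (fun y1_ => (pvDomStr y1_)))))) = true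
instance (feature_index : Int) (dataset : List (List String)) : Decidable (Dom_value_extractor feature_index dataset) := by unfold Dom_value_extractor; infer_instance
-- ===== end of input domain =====

-- B replaces A's two passes (init empty inner dicts, then count with an if/else) by a
-- group-then-tally decomposition: one pass groups labels per feature value, then each
-- label list is tallied; equivalence of the RETURN value is proved on Pre_.

-- ===== PORT A =====
-- entrypoint[feature_index] / entrypoint[-1] as pyGetD (total form; Pre_ gives InRange).
-- values.get(k) after the first loop always finds k, rendered as getD k Dict.empty;
-- labels.get(l) in the true branch (l present) is getD l 0.
def value_extractor (feature_index : Int) (dataset : List (List String)) : List (String × List (String × Int)) :=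
  let values : PySem.Dict String (PySem.Dict String Int) :=
    dataset.foldl (fun v r => v.insert (PySem.List.pyGetD r feature_index "") PySem.Dict.empty)
      PySem.Dict.empty
  let values2 :=
    dataset.foldl (fun v r =>
      let labels := v.getD (PySem.List.pyGetD r feature_index "") PySem.Dict.empty
      if labels.contains (PySem.List.pyGetD r (-1) "") then
        v.insert (PySem.List.pyGetD r feature_index "")
          (labels.insert (PySem.List.pyGetD r (-1) "")
            (labels.getD (PySem.List.pyGetD r (-1) "") 0 + 1))
      else
        v.insert (PySem.List.pyGetD r feature_index "")
          (labels.insert (PySem.List.pyGetD r (-1) "") 1)) values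
  values2.items.map (fun p => (p.1, p.2.items))

-- ===== PORT B =====
def tallyAlt (labels : List String) : PySem.Dict String Int :=
  labels.foldl (fun c l => c.insert l (c.getD l 0 + 1)) PySem.Dict.empty

-- groups.setdefault(row[fi], []).append(row[-1]) = Dict.modify (d[k] = d.get(k, []) ++ [lbl]),
-- exact incl. insertion position (existing key keeps its place, new key appends).
def value_extractor_alt (feature_index : Int) (dataset : List (List String)) : List (String × List (String × Int)) :=
  let groups : PySem.Dict String (List String) :=
    dataset.foldl (fun g r =>
      g.modify (PySem.List.pyGetD r feature_index "") []
        (· ++ [PySem.List.pyGetD r (-1) ""])) PySem.Dict.empty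
  groups.items.map (fun p => (p.1, (tallyAlt p.2).items))

-- ===== PRECONDITION & SPEC =====
-- Pre_ excludes exactly the inputs where Python A raises IndexError: a row on which
-- entrypoint[feature_index] or entrypoint[-1] is out of range.
def Pre_value_extractor (feature_index : Int) (dataset : List (List String)) : Prop :=
  ∀ r ∈ dataset, PySem.Raise.InRange r.length feature_index ∧ r ≠ []
instance (feature_index : Int) (dataset : List (List String)) : Decidable (Pre_value_extractor feature_index dataset) := by unfold Pre_value_extractor; infer_instance

def pvWitness_value_extractor : Int × List (List String) :=
  (0, [["a", "x"], ["a", "y"], ["b", "x"], ["a", "x"]])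

def Spec_value_extractor (feature_index : Int) (dataset : List (List String)) (out : List (String × List (String × Int))) : Prop := out = value_extractor_alt feature_index dataset
instance (feature_index : Int) (dataset : List (List String)) (out : List (String × List (String × Int))) : Decidable (Spec_value_extractor feature_index dataset out) := by unfold Spec_value_extractor; infer_instance

-- ===== CLAIM (what is proved, stated in full; the proofs are below) =====
def Claim_equal_value_extractor : Prop := ∀ (feature_index : Int) (dataset : List (List String)), Dom_value_extractor feature_index dataset → Pre_value_extractor feature_index dataset → Spec_value_extractor feature_index dataset (value_extractor feature_index dataset)

-- ===== LEMMAS AND PROOFS =====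

-- the counting step of A's second loop, once the if/else is merged
def astep (c : PySem.Dict String Int) (l : String) : PySem.Dict String Int :=
  c.insert l (c.getD l 0 + 1)

-- A's first loop leaves every value at the empty inner dict
lemma getD_init (key : List String → String) (ds : List (List String))
    (v : PySem.Dict String (PySem.Dict String Int)) (c : String)
    (h : v.getD c PySem.Dict.empty = PySem.Dict.empty) :
    (ds.foldl (fun v r => v.insert (key r) PySem.Dict.empty) v).getD c PySem.Dict.empty
      = PySem.Dict.empty := by
  induction ds generalizing v with
  | nil => exact h
  | cons r rest ih =>
      refine ih _ ?_
      rw [PySem.Dict.getD_insert]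
      split_ifs <;> simp [h]

-- value at c of A's (merged) counting loop: fold astep over the labels grouped at c
lemma getD_count_loop (pairs : List (String × String))
    (v : PySem.Dict String (PySem.Dict String Int)) (c : String) :
    (pairs.foldl (fun v p => v.insert p.1 (astep (v.getD p.1 PySem.Dict.empty) p.2)) v).getD c PySem.Dict.empty
      = ((pairs.filter (fun p => p.1 == c)).map (·.2)).foldl astep (v.getD c PySem.Dict.empty) := by
  induction pairs generalizing v with
  | nil => rfl
  | cons p rest ih =>
      rcases p with ⟨a, b⟩
      simp only [List.foldl_cons, List.filter_cons]
      by_cases hac : a = c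
      · subst hac
        simp only [beq_self_eq_true, if_pos, List.map_cons, ih, PySem.Dict.getD_insert_self,
          List.foldl_cons]
      · have hb : ((a, b).1 == c) = false := by simp [hac]
        rw [hb]
        simp only [Bool.false_eq_true, if_false, ih,
          PySem.Dict.getD_insert_of_ne _ _ _ (fun h => hac h.symm)]

theorem value_extractor_spec : Claim_equal_value_extractor := by
  intro fi ds _ _
  unfold Spec_value_extractor value_extractor value_extractor_alt
  dsimp only
  set key : List String → String := fun r => PySem.List.pyGetD r fi "" with hkey
  set lbl : List String → String := fun r => PySem.List.pyGetD r (-1) "" with hlbl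
  -- merge A's if/else into astep
  have hfun : (fun (v : PySem.Dict String (PySem.Dict String Int)) (r : List String) =>
      let labels := v.getD (PySem.List.pyGetD r fi "") PySem.Dict.empty
      if labels.contains (PySem.List.pyGetD r (-1) "") then
        v.insert (PySem.List.pyGetD r fi "")
          (labels.insert (PySem.List.pyGetD r (-1) "")
            (labels.getD (PySem.List.pyGetD r (-1) "") 0 + 1))
      else
        v.insert (PySem.List.pyGetD r fi "")
          (labels.insert (PySem.List.pyGetD r (-1) "") 1))
      = (fun v r => v.insert (key r) (astep (v.getD (key r) PySem.Dict.empty) (lbl r))) := by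
    funext v r
    simp only [astep, hkey, hlbl]
    split_ifs with hc
    · rfl
    · rw [PySem.Dict.getD_of_not_contains _ (0 : Int) (by simpa using hc)]
      norm_num
  rw [hfun]
  -- name the three dictionaries
  set v1 : PySem.Dict String (PySem.Dict String Int) :=
    ds.foldl (fun v r => v.insert (key r) PySem.Dict.empty) PySem.Dict.empty with hv1
  set v2 : PySem.Dict String (PySem.Dict String Int) :=
    ds.foldl (fun v r => v.insert (key r) (astep (v.getD (key r) PySem.Dict.empty) (lbl r))) v1 with hv2
  set groups : PySem.Dict String (List String) :=
    ds.foldl (fun g r => g.modify (key r) [] (· ++ [lbl r])) PySem.Dict.empty with hgroups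
  -- keys agree: both are the first-occurrence set of feature values
  have hnd1 : v1.keys.Nodup := PySem.Dict.nodup_keys_foldl_insert_key _ _ _ _ PySem.Dict.nodup_keys_empty
  have hnd2 : v2.keys.Nodup := PySem.Dict.nodup_keys_foldl_insert_key _ _ _ _ hnd1
  have hndG : groups.keys.Nodup := PySem.Dict.nodup_keys_foldl_modify_key _ _ _ _ _ PySem.Dict.nodup_keys_empty
  have hk1 : v1.keys = PySem.Set.ofList (ds.map key) := by
    rw [hv1, PySem.Dict.keys_foldl_insert_key]
    simp [PySem.Set.update_nil_left, PySem.Dict.keys_empty]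
  have hk2 : v2.keys = PySem.Set.ofList (ds.map key) := by
    rw [hv2, PySem.Dict.keys_foldl_insert_key, hk1, PySem.Set.update_eq_append_filter]
    have : List.filter
        (fun y => !(PySem.Set.contains (PySem.Set.ofList (ds.map key)) y))
        (PySem.Set.ofList (ds.map key)) = [] := by
      apply List.filter_eq_nil_iff.mpr
      intro y hy
      rw [(PySem.Set.contains_iff _ _).mpr hy]
      simp
    rw [this, List.append_nil]
  have hkG : groups.keys = PySem.Set.ofList (ds.map key) := by
    rw [hgroups, PySem.Dict.keys_foldl_modify_key]
    simp [PySem.Set.update_nil_left, PySem.Dict.keys_empty]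
  -- values agree at every key
  have hval : ∀ c, v2.getD c PySem.Dict.empty = tallyAlt (groups.getD c []) := by
    intro c
    have hA : v2.getD c PySem.Dict.empty
        = (((ds.map (fun r => (key r, lbl r))).filter (fun p => p.1 == c)).map (·.2)).foldl astep
            (v1.getD c PySem.Dict.empty) := by
      rw [hv2, show (ds.foldl (fun v r => v.insert (key r) (astep (v.getD (key r) PySem.Dict.empty) (lbl r))) v1)
            = ((ds.map (fun r => (key r, lbl r))).foldl
                (fun v p => v.insert p.1 (astep (v.getD p.1 PySem.Dict.empty) p.2)) v1) from by
          rw [List.foldl_map],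
        getD_count_loop]
    have hB : groups.getD c []
        = ((ds.map (fun r => (key r, lbl r))).filter (fun p => p.1 == c)).map (·.2) := by
      rw [hgroups, show (ds.foldl (fun g r => g.modify (key r) [] (· ++ [lbl r])) PySem.Dict.empty)
            = ((ds.map (fun r => (key r, lbl r))).foldl
                (fun g p => g.modify p.1 [] (· ++ [p.2])) PySem.Dict.empty) from by
          rw [List.foldl_map],
        PySem.Dict.getD_foldl_modify_append]
      simp
    rw [hA, hB, hv1, getD_init _ _ _ _ (by simp), tallyAlt]
    rfl
  -- assemble the items lists
  rw [PySem.Dict.items_eq_map_keys v2 hnd2 PySem.Dict.empty,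
      PySem.Dict.items_eq_map_keys groups hndG []]
  rw [List.map_map, List.map_map, hk2, hkG]
  exact List.map_congr_left (fun k _ => by simp [Function.comp, hval k])
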